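-- pv_equiv track=rewrite | github.com/janghoonp12/boj | 백준/Gold/25332. 수들의 합 8/수들의 합 8.py | function
-- ===== SOURCE A (Python) =====
-- def function(n, arr1, arr2):
--     ans = 0
--     arr1 = [0] + arr1
--     arr2 = [0] + arr2
--     arr = [arr1[i] - arr2[i] for i in range(n + 1)]
--
--     cnt = {0 : 1}
--     prefix = [0 for i in range(n + 1)]
--     for i in range(1, n + 1):
--         prefix[i] = arr[i] + prefix[i - 1]
--         ans += cnt.get(prefix[i], 0)
--         cnt[prefix[i]] = cnt.get(prefix[i], 0) + 1
--     return ans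
-- ===== SOURCE B (Python) =====
-- def function(n, arr1, arr2):
--     prefix = [0]
--     s = 0
--     for i in range(n):
--         s += arr1[i] - arr2[i]
--         prefix.append(s)
--     freq = {}
--     for v in prefix:
--         freq[v] = freq.get(v, 0) + 1
--     return sum(c * (c - 1) // 2 for c in freq.values())
-- ===== Notes on version B (the rewrite author's own statement) =====
-- stated objective: alternative
-- what changed: A counts matches incrementally inside the prefix-building loop (ans += running dict count at each step); B builds the prefix-sum list in one pass, tallies all value frequencies afterwards, and returns the combinatorial sum of c*(c-1)//2 over the frequency groups in a separate pass.
import Mathlib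
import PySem

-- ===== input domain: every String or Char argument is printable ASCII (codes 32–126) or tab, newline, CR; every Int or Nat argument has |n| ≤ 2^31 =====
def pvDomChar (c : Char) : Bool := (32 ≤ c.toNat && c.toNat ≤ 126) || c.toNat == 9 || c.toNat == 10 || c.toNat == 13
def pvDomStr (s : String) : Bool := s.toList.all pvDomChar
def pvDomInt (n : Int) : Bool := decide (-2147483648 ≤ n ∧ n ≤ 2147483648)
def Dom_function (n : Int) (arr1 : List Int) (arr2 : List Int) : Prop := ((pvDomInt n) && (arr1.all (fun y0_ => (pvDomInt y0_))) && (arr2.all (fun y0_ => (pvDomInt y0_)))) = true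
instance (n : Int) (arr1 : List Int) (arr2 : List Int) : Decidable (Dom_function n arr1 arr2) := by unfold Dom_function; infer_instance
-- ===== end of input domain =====

-- B replaces A's incremental per-step match counting with a separate frequency tally
-- of the whole prefix-sum list followed by a combinatorial c*(c-1)//2 pass (alternative decomposition, same cost).

-- ===== PORT A =====
def function (n : Int) (arr1 : List Int) (arr2 : List Int) : Int :=
  let arr1' := 0 :: arr1
  let arr2' := 0 :: arr2
  let arr := (PySem.List.pyRange 0 (n+1) 1).map
      (fun i => PySem.List.pyGetD arr1' i 0 - PySem.List.pyGetD arr2' i 0)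
  let prefix0 : List Int := (PySem.List.pyRange 0 (n+1) 1).map (fun _ => (0 : Int))
  let st := (PySem.List.pyRange 1 (n+1) 1).foldl
      (fun (st : Int × PySem.Dict Int Int × List Int) i =>
        let p := PySem.List.pyGetD arr i 0 + PySem.List.pyGetD st.2.2 (i-1) 0
        let pfx := st.2.2.set i.toNat p
        (st.1 + st.2.1.getD p 0, (st.2.1.insert p (st.2.1.getD p 0 + 1), pfx)))
      (0, (PySem.Dict.ofList [((0:Int), (1:Int))], prefix0))
  st.1

-- ===== PORT B =====
def function_alt (n : Int) (arr1 : List Int) (arr2 : List Int) : Int :=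
  let st := (PySem.List.pyRange 0 n 1).foldl
      (fun (st : Int × List Int) i =>
        let s := st.1 + (PySem.List.pyGetD arr1 i 0 - PySem.List.pyGetD arr2 i 0)
        (s, st.2 ++ [s])) (0, [0])
  let freq := st.2.foldl (fun d v => d.insert v (d.getD v 0 + 1)) PySem.Dict.empty
  freq.values.foldl (fun acc c => acc + PySem.Int.floordiv (c * (c - 1)) 2) 0

-- ===== PRECONDITION & SPEC =====
-- Pre_ excludes exactly the inputs where the Python A raises IndexError: n larger than either list's length.
def Pre_function (n : Int) (arr1 : List Int) (arr2 : List Int) : Prop :=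
  n ≤ (arr1.length : Int) ∧ n ≤ (arr2.length : Int)
instance (n : Int) (arr1 : List Int) (arr2 : List Int) : Decidable (Pre_function n arr1 arr2) := by unfold Pre_function; infer_instance
def pvWitness_function : Int × List Int × List Int := (2, [1, 2], [2, 1])

def Spec_function (n : Int) (arr1 : List Int) (arr2 : List Int) (out : Int) : Prop := out = function_alt n arr1 arr2
instance (n : Int) (arr1 : List Int) (arr2 : List Int) (out : Int) : Decidable (Spec_function n arr1 arr2 out) := by unfold Spec_function; infer_instance

-- ===== CLAIM (what is proved, stated in full; the proofs are below) =====
def Claim_equal_function : Prop := ∀ (n : Int) (arr1 : List Int) (arr2 : List Int), Dom_function n arr1 arr2 → Pre_function n arr1 arr2 → Spec_function n arr1 arr2 (function n arr1 arr2)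

-- ===== LEMMAS AND PROOFS =====

/-- prefix sums of a list of deltas, starting after `s` (excluding `s` itself) -/
def pvScan (s : Int) : List Int → List Int
  | [] => []
  | d :: t => (s + d) :: pvScan (s + d) t

/-- number of equal pairs, each element paired with equal ones to its right -/
def pvPairs : List Int → Int
  | [] => 0
  | x :: xs => (xs.count x : Int) + pvPairs xs

/-- left-accumulating pair count: each element paired with equal earlier ones -/
def pvLacc : List Int → List Int → Int
  | _, [] => 0
  | seen, x :: xs => (seen.count x : Int) + pvLacc (x :: seen) xs

def pvC2 (c : Int) : Int := PySem.Int.floordiv (c * (c - 1)) 2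

/-- the per-index delta arr1[j] - arr2[j] -/
def pvDj (arr1 arr2 : List Int) (j : Nat) : Int := arr1.getD j 0 - arr2.getD j 0

/-- the first k+1 prefix sums (the leading 0 included) -/
def pvMk (arr1 arr2 : List Int) (k : Nat) : List Int :=
  0 :: pvScan 0 ((List.range k).map (pvDj arr1 arr2))

lemma pvC2_succ (c : Int) : pvC2 (c + 1) = pvC2 c + c := by
  obtain ⟨k, hk⟩ := Int.even_mul_pred_self c
  unfold pvC2
  rw [PySem.Int.floordiv_eq_ediv_of_pos (by norm_num),
      PySem.Int.floordiv_eq_ediv_of_pos (by norm_num)]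
  have h2 : (c + 1) * (c + 1 - 1) = c * (c - 1) + 2 * c := by ring
  omega

lemma pvScan_length (s : Int) (l : List Int) : (pvScan s l).length = l.length := by
  induction l generalizing s with
  | nil => rfl
  | cons d t ih => simp [pvScan, ih]

lemma pvScan_snoc (l : List Int) (s d : Int) :
    pvScan s (l ++ [d]) = pvScan s l ++ [s + l.sum + d] := by
  induction l generalizing s with
  | nil => simp [pvScan]
  | cons x t ih =>
    simp only [List.cons_append, pvScan, ih, List.sum_cons]
    ring_nf

lemma pvScan_getD_last (l : List Int) (s : Int) :
    (s :: pvScan s l).getD l.length 0 = s + l.sum := by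
  induction l generalizing s with
  | nil => simp
  | cons d t ih =>
    simp only [pvScan, List.length_cons, List.getD_cons_succ, ih, List.sum_cons]
    ring

lemma pvScan_getD_eq (l : List Int) (s : Int) (k : Nat) (hk : k = l.length) :
    (s :: pvScan s l).getD k 0 = s + l.sum := by
  subst hk; exact pvScan_getD_last l s

lemma pvSet_append (l r : List Int) (p : Int) :
    (l ++ r).set l.length p = l ++ r.set 0 p := by
  induction l with
  | nil => rfl
  | cons x t ih => simp [ih]

lemma pvLacc_snoc (l seen : List Int) (x : Int) :
    pvLacc seen (l ++ [x]) = pvLacc seen l + ((seen ++ l).count x : Int) := by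
  induction l generalizing seen with
  | nil => simp [pvLacc]
  | cons y t ih =>
    simp only [List.cons_append, pvLacc, ih, List.count_append, List.count_cons]
    push_cast
    by_cases h : x = y <;> simp [h] <;> ring

lemma pvCount_map_sum (xs : List Int) (x : Int) (seen : List Int) :
    (xs.map (fun y => (((x :: seen).count y : Nat) : Int))).sum
      = (xs.map (fun y => ((seen.count y : Nat) : Int))).sum + (xs.count x : Int) := by
  induction xs with
  | nil => simp
  | cons y t ih =>
    simp only [List.map_cons, List.sum_cons, ih]
    have h1 : (x :: seen).count y = seen.count y + (if x = y then 1 else 0) := by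
      simp [List.count_cons]
    have h2 : (y :: t).count x = t.count x + (if y = x then 1 else 0) := by
      simp [List.count_cons]
    rw [h1, h2]
    by_cases h : y = x
    · subst h; simp; push_cast; ring
    · rw [if_neg h, if_neg (fun hh => h hh.symm)]; push_cast; ring

lemma pvLacc_eq_pairs (l : List Int) : ∀ seen,
    pvLacc seen l = pvPairs l + (l.map (fun y => ((seen.count y : Nat) : Int))).sum := by
  induction l with
  | nil => intro seen; simp [pvLacc, pvPairs]
  | cons x xs ih =>
    intro seen
    simp only [pvLacc, pvPairs, ih (x :: seen), pvCount_map_sum, List.map_cons, List.sum_cons]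
    ring

lemma pvSumC2_eq_pairs (m : List Int) :
    (∑ v ∈ m.toFinset, pvC2 ((m.count v : Nat) : Int)) = pvPairs m := by
  induction m with
  | nil => simp [pvPairs]
  | cons x xs ih =>
    rw [List.toFinset_cons]
    by_cases hx : x ∈ xs.toFinset
    · rw [Finset.insert_eq_self.mpr hx]
      have hcong : ∀ v ∈ xs.toFinset,
          pvC2 ((((x :: xs).count v : Nat)) : Int)
            = pvC2 ((xs.count v : Nat) : Int) + (if v = x then ((xs.count x : Nat) : Int) else 0) := by
        intro v hv
        by_cases hvx : v = x
        · subst hvx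
          have hc : (v :: xs).count v = xs.count v + 1 := by simp [List.count_cons]
          rw [hc]; push_cast; rw [pvC2_succ]; simp
        · have hxv : ¬ x = v := fun h => hvx h.symm
          have hc : (x :: xs).count v = xs.count v := by
            simp [List.count_cons, hvx, hxv]
          rw [hc]; simp [hvx]
      rw [Finset.sum_congr rfl hcong, Finset.sum_add_distrib, ih,
          Finset.sum_ite_eq' xs.toFinset x (fun _ => ((xs.count x : Nat) : Int)), if_pos hx]
      simp [pvPairs]; ring
    · rw [Finset.sum_insert hx]
      have hxs : x ∉ xs := fun h => hx (List.mem_toFinset.mpr h)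
      have hc0 : xs.count x = 0 := List.count_eq_zero.mpr hxs
      have hc1 : (x :: xs).count x = 1 := by simp [List.count_cons, hc0]
      have hcong : ∀ v ∈ xs.toFinset,
          pvC2 ((((x :: xs).count v : Nat)) : Int) = pvC2 ((xs.count v : Nat) : Int) := by
        intro v hv
        have hvx : ¬ v = x := fun h => hx (h ▸ hv)
        have hxv : ¬ x = v := fun h => hvx h.symm
        simp [List.count_cons, hvx, hxv]
      rw [Finset.sum_congr rfl hcong, ih, hc1]
      have h1 : pvC2 1 = 0 := by decide
      simp [h1, pvPairs, hc0]

lemma pvFoldl_c2 (l : List Int) (x : Int) :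
    l.foldl (fun acc c => acc + PySem.Int.floordiv (c * (c - 1)) 2) x
      = x + (l.map pvC2).sum := by
  induction l generalizing x with
  | nil => simp
  | cons c t ih =>
    simp only [List.foldl_cons]
    rw [ih]
    simp only [List.map_cons, List.sum_cons, pvC2]
    ring


lemma pvMk_succ (arr1 arr2 : List Int) (k : Nat) :
    pvMk arr1 arr2 (k + 1)
      = pvMk arr1 arr2 k
          ++ [0 + ((List.range k).map (pvDj arr1 arr2)).sum + pvDj arr1 arr2 k] := by
  unfold pvMk
  rw [List.range_succ, List.map_append, List.map_cons, List.map_nil, pvScan_snoc]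
  rfl

lemma pvMk_length (arr1 arr2 : List Int) (k : Nat) :
    (pvMk arr1 arr2 k).length = k + 1 := by
  simp [pvMk, pvScan_length]

lemma pvB_inv (arr1 arr2 : List Int) (k : Nat) :
    ((List.range k).map (fun (j : Nat) => (0 : Int) + (j : Int))).foldl
      (fun (st : Int × List Int) i =>
        let s := st.1 + (PySem.List.pyGetD arr1 i 0 - PySem.List.pyGetD arr2 i 0)
        (s, st.2 ++ [s])) (0, [0])
    = (((List.range k).map (pvDj arr1 arr2)).sum, pvMk arr1 arr2 k) := by
  induction k with
  | zero => simp [pvMk, pvScan]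
  | succ k ih =>
    rw [List.range_succ, List.map_append, List.map_cons, List.map_nil,
        List.foldl_append, ih]
    simp only [List.foldl_cons, List.foldl_nil]
    have hc : ((0 : Int) + (k : Int)) = ((k : Nat) : Int) := by push_cast; ring
    rw [hc, PySem.List.pyGetD_natCast, PySem.List.pyGetD_natCast, pvMk_succ]
    simp only [List.map_append, List.map_cons, List.map_nil, List.sum_append,
      List.sum_cons, List.sum_nil, pvDj]
    refine Prod.ext ?_ ?_ <;> simp <;> ring_nf

lemma pvA_inv (n : Int) (arr1 arr2 : List Int) (N : Nat) (hN : n = (N : Int)) :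
    ∀ k : Nat, k ≤ N →
    ((List.range k).map (fun (j : Nat) => (1 : Int) + (j : Int))).foldl
      (fun (st : Int × PySem.Dict Int Int × List Int) i =>
        let p := PySem.List.pyGetD
            ((PySem.List.pyRange 0 (n+1) 1).map
              (fun i => PySem.List.pyGetD (0 :: arr1) i 0 - PySem.List.pyGetD (0 :: arr2) i 0)) i 0
          + PySem.List.pyGetD st.2.2 (i-1) 0
        let pfx := st.2.2.set i.toNat p
        (st.1 + st.2.1.getD p 0, (st.2.1.insert p (st.2.1.getD p 0 + 1), pfx)))
      (0, (PySem.Dict.ofList [((0:Int), (1:Int))],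
           (PySem.List.pyRange 0 (n+1) 1).map (fun _ => (0 : Int))))
    = (pvLacc [] (pvMk arr1 arr2 k),
       ((pvMk arr1 arr2 k).foldl (fun d v => d.insert v (d.getD v 0 + 1)) PySem.Dict.empty,
        pvMk arr1 arr2 k ++ List.replicate (N - k) 0)) := by
  intro k hk
  induction k with
  | zero =>
    simp only [List.range_zero, List.map_nil, List.foldl_nil]
    refine Prod.ext ?_ (Prod.ext ?_ ?_)
    · simp [pvMk, pvScan, pvLacc]
    · show PySem.Dict.ofList [((0:Int), (1:Int))]
        = (pvMk arr1 arr2 0).foldl (fun d v => d.insert v (d.getD v 0 + 1)) PySem.Dict.empty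
      simp only [pvMk, List.range_zero, List.map_nil]
      decide
    · show (PySem.List.pyRange 0 (n+1) 1).map (fun _ => (0 : Int))
        = pvMk arr1 arr2 0 ++ List.replicate (N - 0) 0
      have hlen : ((n + 1 - 0).toNat) = N + 1 := by omega
      rw [List.map_const', PySem.List.length_pyRange_one, hlen]
      simp [pvMk, pvScan, List.replicate_succ]
  | succ k ih =>
    have hk' : k ≤ N := Nat.le_of_succ_le hk
    have hkN : k < N := hk
    rw [List.range_succ, List.map_append, List.map_cons, List.map_nil,
        List.foldl_append, ih hk']
    simp only [List.foldl_cons, List.foldl_nil]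
    -- the value read from arr at index i = 1 + k
    have harr : PySem.List.pyGetD
        ((PySem.List.pyRange 0 (n+1) 1).map
          (fun i => PySem.List.pyGetD (0 :: arr1) i 0 - PySem.List.pyGetD (0 :: arr2) i 0))
        ((1 : Int) + (k : Int)) 0 = pvDj arr1 arr2 k := by
      rw [PySem.List.pyGetD_map_pyRange_of_nonneg _ (n+1) _ _ (by positivity) (by omega)]
      have hc : ((1 : Int) + (k : Int)) = ((k + 1 : Nat) : Int) := by push_cast; ring
      rw [hc, PySem.List.pyGetD_natCast, PySem.List.pyGetD_natCast]
      simp [pvDj]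
    -- the value read from prefix at index i - 1 = k
    have hpre : PySem.List.pyGetD (pvMk arr1 arr2 k ++ List.replicate (N - k) 0)
        ((1 : Int) + (k : Int) - 1) 0 = 0 + ((List.range k).map (pvDj arr1 arr2)).sum := by
      have hc : ((1 : Int) + (k : Int) - 1) = ((k : Nat) : Int) := by push_cast; ring
      rw [hc, PySem.List.pyGetD_natCast]
      rw [List.getD_append _ _ _ _ (by rw [pvMk_length]; omega)]
      unfold pvMk
      exact pvScan_getD_eq _ _ _ (by simp)
    rw [harr, hpre]
    have htn : ((1 : Int) + (k : Int)).toNat = k + 1 := by omega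
    rw [htn]
    set p : Int := pvDj arr1 arr2 k + (0 + ((List.range k).map (pvDj arr1 arr2)).sum) with hp
    have hmk1 : pvMk arr1 arr2 (k + 1) = pvMk arr1 arr2 k ++ [p] := by
      rw [pvMk_succ, hp]; congr 1; simp; ring
    have h1 : pvLacc [] (pvMk arr1 arr2 k)
          + (List.foldl (fun d v => d.insert v (d.getD v 0 + 1)) PySem.Dict.empty (pvMk arr1 arr2 k)).getD p 0
        = pvLacc [] (pvMk arr1 arr2 k ++ [p]) := by
      rw [PySem.Dict.foldl_insert_getD_add_one_eq_counter, PySem.Dict.getD_counter, pvLacc_snoc]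
      simp
    have h2 : (List.foldl (fun d v => d.insert v (d.getD v 0 + 1)) (PySem.Dict.empty : PySem.Dict Int Int) (pvMk arr1 arr2 k)).insert p
          ((List.foldl (fun d v => d.insert v (d.getD v 0 + 1)) PySem.Dict.empty (pvMk arr1 arr2 k)).getD p 0 + 1)
        = List.foldl (fun d v => d.insert v (d.getD v 0 + 1)) (PySem.Dict.empty : PySem.Dict Int Int) (pvMk arr1 arr2 k ++ [p]) := by
      rw [List.foldl_append]
      simp
    have h3 : (pvMk arr1 arr2 k ++ List.replicate (N - k) 0).set (k + 1) p
        = (pvMk arr1 arr2 k ++ [p]) ++ List.replicate (N - (k + 1)) 0 := by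
      rw [show N - k = (N - (k + 1)) + 1 from by omega, List.replicate_succ,
          show k + 1 = (pvMk arr1 arr2 k).length from (pvMk_length arr1 arr2 k).symm,
          pvSet_append]
      simp
    rw [hmk1]
    simp only [Prod.mk.injEq]
    exact ⟨h1, h2, h3⟩

theorem function_spec : Claim_equal_function := by
  intro n arr1 arr2 _ _
  unfold Spec_function function function_alt
  by_cases hn : 0 ≤ n
  · obtain ⟨N, hN⟩ : ∃ N : Nat, n = (N : Int) := ⟨n.toNat, (Int.toNat_of_nonneg hn).symm⟩
    subst hN
    have hr1 : PySem.List.pyRange 1 ((N : Int) + 1) 1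
        = (List.range N).map (fun (j : Nat) => (1 : Int) + (j : Int)) := by
      rw [PySem.List.pyRange_one, show (((N : Int) + 1 - 1).toNat) = N from by omega]
    have hr0 : PySem.List.pyRange 0 (N : Int) 1
        = (List.range N).map (fun (j : Nat) => (0 : Int) + (j : Int)) := by
      rw [PySem.List.pyRange_one, show (((N : Int) - 0).toNat) = N from by omega]
    simp only [hr1, hr0]
    rw [pvA_inv (N : Int) arr1 arr2 N rfl N le_rfl, pvB_inv arr1 arr2 N]
    set m : List Int := pvMk arr1 arr2 N with hm
    show pvLacc [] m
      = ((m.foldl (fun d v => d.insert v (d.getD v 0 + 1)) PySem.Dict.empty).values).foldl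
          (fun acc c => acc + PySem.Int.floordiv (c * (c - 1)) 2) 0
    rw [PySem.Dict.foldl_insert_getD_add_one_eq_counter, pvFoldl_c2]
    have hvals : (PySem.Dict.counter m).values
        = (PySem.Set.ofList m).map (fun v => ((m.count v : Nat) : Int)) := by
      show ((PySem.Dict.counter m).items).map Prod.snd = _
      rw [PySem.Dict.items_counter, List.map_map]
      rfl
    rw [hvals, List.map_map]
    simp only [Function.comp_def]
    have hfs : (PySem.Set.ofList m : List Int).toFinset = m.toFinset := by
      ext v
      simp [List.mem_toFinset, PySem.Set.mem_ofList]
    have hsum : ((PySem.Set.ofList m : List Int).map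
          (fun v => pvC2 ((m.count v : Nat) : Int))).sum = pvPairs m := by
      rw [← List.sum_toFinset _ (PySem.Set.nodup_ofList m), hfs, pvSumC2_eq_pairs]
    have hl : pvLacc [] m = pvPairs m := by
      rw [pvLacc_eq_pairs]
      simp
    rw [hl, ← hsum]
    ring
  · have h1 : PySem.List.pyRange 1 (n + 1) 1 = [] :=
      PySem.List.pyRange_one_eq_nil (by omega)
    have h0 : PySem.List.pyRange 0 n 1 = [] :=
      PySem.List.pyRange_one_eq_nil (by omega)
    simp only [h1, h0, List.map_nil, List.foldl_nil]
    decide
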